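-- pv_equiv track=rewrite | github.com/unisport/sample | utilities/input_guard.py | guard_products_failed
-- ===== SOURCE A (Python) =====
-- allowed_fields =set(['kids', 'name', 'package', 'kid_adult', 'free_porto', 'price', 'sizes', 'delivery', 'url', 'price_old', 'img_url', 'women'])
--
-- def guard_products_failed(fields):
--     input_filelds = set(fields)
--     result = input_filelds.difference(allowed_fields)
--     if len(result) == 0 :
--         return False
--     for item in result:
--         if item not in allowed_fields:
--             return True
--     return False
-- ===== SOURCE B (Python) =====
-- allowed_fields = set(['kids', 'name', 'package', 'kid_adult', 'free_porto', 'price', 'sizes', 'delivery', 'url', 'price_old', 'img_url', 'women'])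
--
-- def guard_products_failed(fields):
--     # Counting decomposition: count the allowed entries in one pass and compare
--     # the tally with the total length; no sets of the input are built at all.
--     allowed_count = 0
--     total = 0
--     for f in fields:
--         total += 1
--         if f in allowed_fields:
--             allowed_count += 1
--     return allowed_count != total
-- ===== Notes on version B (the rewrite author's own statement) =====
-- stated objective: alternative
-- what changed: Replaced A's build-a-set / set-difference / loop-over-the-difference pipeline with an arithmetic counting pass: B tallies the allowed entries and the total in one loop and returns whether the two counts differ, building no sets and doing no existence search.
import Mathlib
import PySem

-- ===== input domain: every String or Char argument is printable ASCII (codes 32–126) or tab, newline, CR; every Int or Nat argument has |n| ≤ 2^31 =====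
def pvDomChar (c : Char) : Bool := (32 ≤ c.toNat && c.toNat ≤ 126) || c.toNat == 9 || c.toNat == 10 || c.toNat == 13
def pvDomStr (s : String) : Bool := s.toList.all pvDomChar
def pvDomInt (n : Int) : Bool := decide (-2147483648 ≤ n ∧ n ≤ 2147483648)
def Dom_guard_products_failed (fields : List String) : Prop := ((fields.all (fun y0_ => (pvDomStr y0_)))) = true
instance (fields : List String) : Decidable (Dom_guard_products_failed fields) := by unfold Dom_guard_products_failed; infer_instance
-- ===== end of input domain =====

-- B replaces A's set / set-difference / search loop with an arithmetic counting pass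
-- (tally allowed entries and total, return whether the tallies differ); objective: alternative.

-- ===== PORT A =====
def pvAllowedFields : PySem.Set String :=
  PySem.Set.ofList ["kids", "name", "package", "kid_adult", "free_porto", "price", "sizes",
    "delivery", "url", "price_old", "img_url", "women"]

-- the 'for item in result: if item not in allowed_fields: return True' loop
def pvGuardLoopA : List String → Bool
  | [] => false
  | item :: rest => if ¬ (PySem.Set.contains pvAllowedFields item = true) then true else pvGuardLoopA rest

def guard_products_failed (fields : List String) : Bool :=
  let input_filelds := PySem.Set.ofList fields
  let result := PySem.Set.diff input_filelds pvAllowedFields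
  if PySem.Set.len result = 0 then false
  else pvGuardLoopA result

-- ===== PORT B =====
-- B's single loop carries the pair (allowed_count, total)
def pvGuardCountB (fields : List String) : Int × Int :=
  fields.foldl
    (fun st f =>
      (if PySem.Set.contains pvAllowedFields f then st.1 + 1 else st.1, st.2 + 1))
    (0, 0)

def guard_products_failed_alt (fields : List String) : Bool :=
  let st := pvGuardCountB fields
  decide (st.1 ≠ st.2)

-- ===== PRECONDITION & SPEC =====
def Spec_guard_products_failed (fields : List String) (out : Bool) : Prop := out = guard_products_failed_alt fields
instance (fields : List String) (out : Bool) : Decidable (Spec_guard_products_failed fields out) := by unfold Spec_guard_products_failed; infer_instance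

-- ===== CLAIM (what is proved, stated in full; the proofs are below) =====
def Claim_equal_guard_products_failed : Prop := ∀ (fields : List String), Dom_guard_products_failed fields → Spec_guard_products_failed fields (guard_products_failed fields)

-- ===== LEMMAS AND PROOFS =====
theorem pvGuardCountB_shift (l : List String) (a t : Int) :
    l.foldl (fun st f =>
      ((if PySem.Set.contains pvAllowedFields f then st.1 + 1 else st.1 : Int), st.2 + 1)) (a, t)
    = (a + (l.countP (fun f => PySem.Set.contains pvAllowedFields f) : Int), t + l.length) := by
  induction l generalizing a t with
  | nil => simp
  | cons x xs ih =>
    rw [List.foldl_cons, ih, List.countP_cons, List.length_cons]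
    cases h : PySem.Set.contains pvAllowedFields x <;>
      simp only [h, Bool.false_eq_true, if_true, if_false, Prod.mk.injEq] <;>
      constructor <;> push_cast <;> ring

theorem guard_alt_iff (fields : List String) :
    guard_products_failed_alt fields = true ↔ ∃ x ∈ fields, x ∉ pvAllowedFields := by
  unfold guard_products_failed_alt pvGuardCountB
  rw [pvGuardCountB_shift]
  simp only [zero_add, decide_eq_true_eq]
  have hmain : (fields.countP (fun f => PySem.Set.contains pvAllowedFields f) = fields.length)
      ↔ ∀ x ∈ fields, x ∈ pvAllowedFields := by
    rw [List.countP_eq_length]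
    constructor
    · intro h x hx; exact (PySem.Set.contains_iff _ _).mp (h x hx)
    · intro h x hx; exact (PySem.Set.contains_iff _ _).mpr (h x hx)
  constructor
  · intro hne
    have hnall : ¬ ∀ x ∈ fields, x ∈ pvAllowedFields := fun h => hne (by exact_mod_cast hmain.mpr h)
    push Not at hnall
    exact hnall
  · rintro ⟨x, hx, hp⟩ heq
    exact hp (hmain.mp (by exact_mod_cast heq) x hx)

theorem pvGuardLoopA_eq_any (l : List String) :
    pvGuardLoopA l = l.any (fun item => ¬ (PySem.Set.contains pvAllowedFields item = true)) := by
  induction l with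
  | nil => rfl
  | cons x xs ih =>
    simp only [pvGuardLoopA, List.any_cons, ih]
    by_cases h : PySem.Set.contains pvAllowedFields x = true <;> simp [h]

theorem guard_a_iff (fields : List String) :
    guard_products_failed fields = true ↔ ∃ x ∈ fields, x ∉ pvAllowedFields := by
  unfold guard_products_failed
  by_cases h : PySem.Set.len (PySem.Set.diff (PySem.Set.ofList fields) pvAllowedFields) = 0
  · simp only [h, if_true]
    have hnil : PySem.Set.diff (PySem.Set.ofList fields) pvAllowedFields = [] := by
      simpa [PySem.Set.len] using h
    constructor
    · intro hc; exact absurd hc (by simp)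
    · rintro ⟨x, hx, hp⟩
      have hmem : x ∈ PySem.Set.diff (PySem.Set.ofList fields) pvAllowedFields :=
        (PySem.Set.mem_diff _ _ _).mpr ⟨(PySem.Set.mem_ofList _ _).mpr hx, hp⟩
      simp [hnil] at hmem
  · simp only [h, if_false, pvGuardLoopA_eq_any, List.any_eq_true]
    constructor
    · rintro ⟨x, hx, hp⟩
      have hd := (PySem.Set.mem_diff _ _ _).mp hx
      have hnc : ¬ (PySem.Set.contains pvAllowedFields x = true) := by simpa using hp
      exact ⟨x, (PySem.Set.mem_ofList _ _).mp hd.1,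
        fun hm => hnc ((PySem.Set.contains_iff _ _).mpr hm)⟩
    · rintro ⟨x, hx, hp⟩
      refine ⟨x, (PySem.Set.mem_diff _ _ _).mpr ⟨(PySem.Set.mem_ofList _ _).mpr hx, hp⟩, ?_⟩
      simp only [decide_eq_true_eq]
      intro hc
      exact hp ((PySem.Set.contains_iff _ _).mp hc)

-- ===== VERDICT (by name: the statement is the Claim_ definition above) =====
theorem guard_products_failed_spec : Claim_equal_guard_products_failed := by
  intro fields _
  unfold Spec_guard_products_failed
  rw [Bool.eq_iff_iff, guard_a_iff, guard_alt_iff]
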